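-- pv_equiv track=rewrite | github.com/Vidyasagar-Dadilwar/Design-Patterns | Codes(15.09.24)/22(file).py | fit
-- ===== SOURCE A (Python) =====
-- def fit(frags, candidate):
--     temp = frags.copy()
--     for i in range(1, len(candidate)):
--         if not temp:
--             break
--         prefix = candidate[:i]
--         suffix = candidate[i:]
--         temp = [x for x in temp if x.lower() != prefix.lower()]
--         temp = [x for x in temp if x.lower() != suffix.lower()]
--     return not temp
-- ===== SOURCE B (Python) =====
-- def fit(frags, candidate):
--     if not frags:
--         return True
--     valid = set()
--     for i in range(1, len(candidate)):
--         valid.add(candidate[:i].lower())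
--         valid.add(candidate[i:].lower())
--     return all(f.lower() in valid for f in frags)
-- ===== Notes on version B (the rewrite author's own statement) =====
-- stated objective: simpler
-- what changed: Replaces A's interleaved build-and-filter loop (re-filtering the surviving fragment list at every split point) with a build-index-then-verify decomposition: one pass builds the set of all lowercased proper prefixes/suffixes of candidate, then a single all() membership pass checks every fragment.
import Mathlib
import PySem

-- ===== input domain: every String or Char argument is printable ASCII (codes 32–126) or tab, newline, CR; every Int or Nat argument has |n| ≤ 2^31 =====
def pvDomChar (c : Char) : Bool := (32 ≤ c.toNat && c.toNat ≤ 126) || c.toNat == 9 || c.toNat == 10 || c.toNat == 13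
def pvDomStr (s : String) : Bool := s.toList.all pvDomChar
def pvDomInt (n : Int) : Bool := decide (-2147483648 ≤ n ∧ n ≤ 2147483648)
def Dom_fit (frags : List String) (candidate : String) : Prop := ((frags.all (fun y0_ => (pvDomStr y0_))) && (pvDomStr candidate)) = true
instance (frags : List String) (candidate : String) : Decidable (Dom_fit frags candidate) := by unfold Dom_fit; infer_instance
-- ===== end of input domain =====

-- B replaces A's repeated filtering of the surviving fragment list at every split point by
-- building the set of lowercased proper prefixes/suffixes once and checking each fragment by membership (simpler decomposition).

-- ===== PORT A =====
def fit (frags : List String) (candidate : String) : Bool :=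
  let temp := frags
  let temp := (PySem.List.pyRange 1 (PySem.Str.len candidate) 1).foldl (fun temp i =>
    if temp = [] then temp           -- 'break': once empty it stays empty
    else
      let pfx := PySem.Str.slice candidate none (some i)
      let sfx := PySem.Str.slice candidate (some i) none
      let temp := temp.filter (fun x => !(PySem.Str.lower x == PySem.Str.lower pfx))
      temp.filter (fun x => !(PySem.Str.lower x == PySem.Str.lower sfx))) temp
  temp.isEmpty

-- ===== PORT B =====
def fit_alt (frags : List String) (candidate : String) : Bool :=
  if frags = [] then true
  else
    let valid : PySem.Set String := (PySem.List.pyRange 1 (PySem.Str.len candidate) 1).foldl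
      (fun s i =>
        PySem.Set.add
          (PySem.Set.add s (PySem.Str.lower (PySem.Str.slice candidate none (some i))))
          (PySem.Str.lower (PySem.Str.slice candidate (some i) none)))
      PySem.Set.empty
    frags.all (fun f => PySem.Set.contains valid (PySem.Str.lower f))

-- ===== PRECONDITION & SPEC =====
def Spec_fit (frags : List String) (candidate : String) (out : Bool) : Prop := out = fit_alt frags candidate
instance (frags : List String) (candidate : String) (out : Bool) : Decidable (Spec_fit frags candidate out) := by unfold Spec_fit; infer_instance

-- ===== CLAIM (what is proved, stated in full; the proofs are below) =====
def Claim_equal_fit : Prop := ∀ (frags : List String) (candidate : String), Dom_fit frags candidate → Spec_fit frags candidate (fit frags candidate)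

-- ===== LEMMAS AND PROOFS =====

-- Folding a list of filters equals one filter with the conjoined predicate.
theorem fit_foldl_filter (P : Int → String → Bool) (is : List Int) (temp : List String) :
    is.foldl (fun t i => t.filter (P i)) temp
      = temp.filter (fun x => is.all (fun i => P i x)) := by
  induction is generalizing temp with
  | nil => simp
  | cons i is ih =>
    simp only [List.foldl_cons, ih, List.filter_filter]
    exact List.filter_congr (fun x _ => by simp only [List.all_cons]; exact Bool.and_comm _ _)

-- A's loop body (with its 'break'-modelling branch) is the filter with both predicates.
theorem fit_stepA_eq (cand : String) :
    (fun (temp : List String) (i : Int) =>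
      if temp = [] then temp
      else
        let pfx := PySem.Str.slice cand none (some i)
        let sfx := PySem.Str.slice cand (some i) none
        let temp := temp.filter (fun x => !(PySem.Str.lower x == PySem.Str.lower pfx))
        temp.filter (fun x => !(PySem.Str.lower x == PySem.Str.lower sfx)))
    = (fun (temp : List String) (i : Int) => temp.filter (fun x =>
        !(PySem.Str.lower x == PySem.Str.lower (PySem.Str.slice cand none (some i))) &&
        !(PySem.Str.lower x == PySem.Str.lower (PySem.Str.slice cand (some i) none)))) := by
  funext temp i
  by_cases h : temp = []
  · subst h; simp
  · simp only [if_neg h, List.filter_filter]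
    exact List.filter_congr (fun x _ => Bool.and_comm _ _)

-- Membership in B's accumulated set.
theorem fit_loopB_mem (cand : String) (is : List Int) (acc : PySem.Set String) (y : String) :
    (y ∈ is.foldl (fun s i =>
        PySem.Set.add
          (PySem.Set.add s (PySem.Str.lower (PySem.Str.slice cand none (some i))))
          (PySem.Str.lower (PySem.Str.slice cand (some i) none))) acc)
    ↔ (y ∈ acc ∨ ∃ i ∈ is,
        y = PySem.Str.lower (PySem.Str.slice cand none (some i)) ∨
        y = PySem.Str.lower (PySem.Str.slice cand (some i) none)) := by
  induction is generalizing acc with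
  | nil => simp
  | cons i is ih =>
    rw [List.foldl_cons, ih, PySem.Set.mem_add, PySem.Set.mem_add, List.exists_mem_cons_iff]
    simp only [or_assoc]

-- ===== VERDICT (by name: the statement is the Claim_ definition above) =====
theorem fit_spec : Claim_equal_fit := by
  intro frags cand _
  unfold Spec_fit fit fit_alt
  simp only [fit_stepA_eq, fit_foldl_filter]
  by_cases hf : frags = []
  · subst hf; simp
  · simp only [if_neg hf]
    rw [Bool.eq_iff_iff]
    simp only [List.isEmpty_iff, List.filter_eq_nil_iff, List.all_eq_true]
    constructor
    · intro h f hfm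
      rw [PySem.Set.contains_iff, fit_loopB_mem]
      have hx := h f hfm
      simp only [Bool.not_eq_true', Bool.and_eq_true, beq_eq_false_iff_ne, ne_eq, not_forall] at hx
      rcases hx with ⟨i, hi, hne⟩
      rw [not_and_or, not_not, not_not] at hne
      exact Or.inr ⟨i, hi, hne⟩
    · intro h f hfm hall
      have hc := h f hfm
      rw [PySem.Set.contains_iff, fit_loopB_mem] at hc
      rcases hc with h' | ⟨i, hi, h'⟩
      · exact absurd h' (by simp [PySem.Set.empty])
      · have := hall i hi
        rcases h' with h' | h' <;> simp [h'] at this
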